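-- pv_equiv track=rewrite | github.com/microsoft/onnxruntime | waston.py | group_gpu_activity
-- ===== SOURCE A (Python) =====
-- activities = [
--     ('nccl', lambda x : x.find('nccl') >= 0),
--     ('gemm', lambda x : 'gemm' in x),
--     ('gemv', lambda x : any(substr in x for substr in ['cublasGemvTensorStridedBatched'])),
--     ('memcpy DtoD', lambda x : any(substr in x.lower() for substr in ['memcpy dtod'])),
--     ('memcpy HtoD', lambda x : any(substr in x.lower() for substr in ['memcpy htod'])),
--     ('memcpy DtoH', lambda x : any(substr in x.lower() for substr in ['memcpy dtoh'])),
--     ('memset', lambda x : any(substr in x for substr in ['memset'])),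
--     ('adam', lambda x : x.lower().find('adam') >= 0),
--     ('lamb', lambda x : x.lower().find('lamb') >= 0),
--     ('dropout', lambda x : x.lower().find('dropout') >= 0),
--     ('gelu', lambda x : any(substr in x.lower() for substr in ['gelu'])),
--     ('relu', lambda x : any(substr in x for substr in ['OP_Relu', 'threshold_kernel_impl', 'clamp_min_scalar_kernel_impl'])),
--     ('sqrt', lambda x : 'sqrt' in x),
--     ('non-zero', lambda x : any(substr in x.lower() for substr in ['NonZero', 'write_indices'])),
--     ('compare', lambda x : any(substr in x for substr in ['CompareGEFunctor', 'CompareNEFunctor','CompareEqFunctor', 'CompareLTFunctor', 'CompareGTFunctor', 'OP_Greater', 'OP_GreaterOrEqual', 'OP_Equal', 'OP_Less', 'OP_LessOrEqual'])),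
--     ('isfinite', lambda x : 'foreach_non_finite_check_and_unscale' in x),
--     ('layernorm', lambda x : any(substr in x for substr in ['LayerNorm', 'layer_norm', 'layernorm', 'bn_fw_tr_1C11_singleread', 'cuCompute'])),
--     ('reduce', lambda x : any(substr in x for substr in ['reduce', 'op_tensor_kernel_alpha2_zero'])),
--     ('cross_entropy', lambda x : any(substr in x for substr in ['XEntropy', 'CrossEntropy', 'NLLCriterion'])),
--     ('softmax', lambda x : any(substr in x.lower() for substr in ['softmax'])),
--     ('embedding', lambda x : any(substr in x for substr in ['indexSelectLargeIndex', 'Embedding', 'compute_grad_weight', 'krn_partials_per_segment', 'krn_partial_segment_offset'])),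
--     ('gather-scatter', lambda x : any(substr in x.lower() for substr in ['gather', 'scatter', 'index_kernel_impl', 'index_put_kernel_impl', 'indexing_backward_kernel'])),
--     ('l2norm', lambda x : 'L2Norm' in x),
--     ('sigmoid', lambda x : 'sigmoid' in x.lower()),
--     ('add-sub', lambda x : any(substr in x for substr in ['onnxruntime::cuda::OP_Add', 'onnxruntime::cuda::OP_Sub', 'at::native::AddFunctor'])),
--     ('mul-div', lambda x : any(substr in x for substr in ['onnxruntime::cuda::OP_Mul', 'onnxruntime::cuda::OP_Div', 'at::native::MulFunctor', 'at::native::MulScalarFunctor', 'ScaleFunctor', 'DivFunctor', 'onnxruntime::cuda::_Scale', 'DivGrad'])),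
--     ('addc-muldiv', lambda x : any(substr in x for substr in ['addcdiv_cuda_kernel', 'addcmul_cuda_kernel'])),
--     ('sort', lambda x : any(substr in x for substr in ['merge_sort', 'RadixSort'])),
--     ('copy', lambda x : any(substr in x for substr in ['BatchedCopy', 'copy_device_to_device'])),
--     ('cast', lambda x : 'OP_Cast' in x),
--     ('transpose', lambda x : any(substr in x.lower() for substr in ['transpose', 'copy_kernel_impl'])),
--     ('slice', lambda x : any(substr in x for substr in ['Slice'])),
--     ('concat-split', lambda x : any(substr in x for substr in ['Concat', 'Split'])),
--     ('expand', lambda x : any(substr in x for substr in ['Expand'])),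
--     ('tile', lambda x : any(substr in x for substr in ['onnxruntime::cuda::_TileMemcpyKernel'])),
--     ('fill_functor', lambda x : any(substr in x for substr in ['onnxruntime::cuda::_Fill', 'at::native::FillFunctor'])),
--     ('where', lambda x : any(substr in x for substr in ['onnxruntime::cuda::_TenaryElementWise', 'kernelPointwiseApply2<TensorMaskedFillOp', 'masked_fill_kernel'])),
--     ('element-wise', lambda x : any(substr in x.lower() for substr in ['elementwise', 'pointwise'])),
--     ('misc', lambda x : True),
-- ]
--
-- def group_gpu_activity(lines):
--     groups = { name : [] for name,_ in activities }
--     for kernel_name, value in lines.items():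
--         for name, check in activities:
--             if check(kernel_name):
--                 groups[name].append({kernel_name: value})
--                 break
--     return groups
-- ===== SOURCE B (Python) =====
-- # Data-driven rules table (name, match-on-lowercase?, needle substrings) with a single
-- # generic matcher, plus a label-then-group decomposition: each kernel is classified
-- # once (computing its lowercase form once), then the output dict is assembled per
-- # category from the precomputed labels.
-- RULES = [
--     ("nccl", False, ["nccl"]),
--     ("gemm", False, ["gemm"]),
--     ("gemv", False, ["cublasGemvTensorStridedBatched"]),
--     ("memcpy DtoD", True, ["memcpy dtod"]),
--     ("memcpy HtoD", True, ["memcpy htod"]),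
--     ("memcpy DtoH", True, ["memcpy dtoh"]),
--     ("memset", False, ["memset"]),
--     ("adam", True, ["adam"]),
--     ("lamb", True, ["lamb"]),
--     ("dropout", True, ["dropout"]),
--     ("gelu", True, ["gelu"]),
--     ("relu", False, ["OP_Relu", "threshold_kernel_impl", "clamp_min_scalar_kernel_impl"]),
--     ("sqrt", False, ["sqrt"]),
--     ("non-zero", True, ["NonZero", "write_indices"]),
--     ("compare", False, ["CompareGEFunctor", "CompareNEFunctor", "CompareEqFunctor", "CompareLTFunctor", "CompareGTFunctor", "OP_Greater", "OP_GreaterOrEqual", "OP_Equal", "OP_Less", "OP_LessOrEqual"]),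
--     ("isfinite", False, ["foreach_non_finite_check_and_unscale"]),
--     ("layernorm", False, ["LayerNorm", "layer_norm", "layernorm", "bn_fw_tr_1C11_singleread", "cuCompute"]),
--     ("reduce", False, ["reduce", "op_tensor_kernel_alpha2_zero"]),
--     ("cross_entropy", False, ["XEntropy", "CrossEntropy", "NLLCriterion"]),
--     ("softmax", True, ["softmax"]),
--     ("embedding", False, ["indexSelectLargeIndex", "Embedding", "compute_grad_weight", "krn_partials_per_segment", "krn_partial_segment_offset"]),
--     ("gather-scatter", True, ["gather", "scatter", "index_kernel_impl", "index_put_kernel_impl", "indexing_backward_kernel"]),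
--     ("l2norm", False, ["L2Norm"]),
--     ("sigmoid", True, ["sigmoid"]),
--     ("add-sub", False, ["onnxruntime::cuda::OP_Add", "onnxruntime::cuda::OP_Sub", "at::native::AddFunctor"]),
--     ("mul-div", False, ["onnxruntime::cuda::OP_Mul", "onnxruntime::cuda::OP_Div", "at::native::MulFunctor", "at::native::MulScalarFunctor", "ScaleFunctor", "DivFunctor", "onnxruntime::cuda::_Scale", "DivGrad"]),
--     ("addc-muldiv", False, ["addcdiv_cuda_kernel", "addcmul_cuda_kernel"]),
--     ("sort", False, ["merge_sort", "RadixSort"]),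
--     ("copy", False, ["BatchedCopy", "copy_device_to_device"]),
--     ("cast", False, ["OP_Cast"]),
--     ("transpose", True, ["transpose", "copy_kernel_impl"]),
--     ("slice", False, ["Slice"]),
--     ("concat-split", False, ["Concat", "Split"]),
--     ("expand", False, ["Expand"]),
--     ("tile", False, ["onnxruntime::cuda::_TileMemcpyKernel"]),
--     ("fill_functor", False, ["onnxruntime::cuda::_Fill", "at::native::FillFunctor"]),
--     ("where", False, ["onnxruntime::cuda::_TenaryElementWise", "kernelPointwiseApply2<TensorMaskedFillOp", "masked_fill_kernel"]),
--     ("element-wise", True, ["elementwise", "pointwise"]),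
--     ("misc", False, [""]),  # "" is a substring of everything: catch-all
-- ]
--
--
-- def _classify(kernel_name):
--     low = kernel_name.lower()
--     for name, use_lower, needles in RULES:
--         hay = low if use_lower else kernel_name
--         if any(n in hay for n in needles):
--             return name
--     return "misc"  # unreachable: the last rule matches everything
--
--
-- def group_gpu_activity(lines):
--     items = list(lines.items())
--     labels = [_classify(k) for k, _ in items]
--     return {name: [{k: v} for (k, v), lab in zip(items, labels) if lab == name]
--             for name, _, _ in RULES}
-- ===== Notes on version B (the rewrite author's own statement) =====
-- stated objective: alternative
-- what changed: B replaces A's list of per-category predicate closures by a plain data table of (name, match-on-lowercase flag, needle substrings) with one generic matcher, and changes the decomposition: each kernel is classified once into a label (computing its lowercase form once), then the groups are assembled per category from the precomputed labels, instead of A's per-line inner scan over predicate lambdas appending into a pre-initialized dict.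
import Mathlib
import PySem

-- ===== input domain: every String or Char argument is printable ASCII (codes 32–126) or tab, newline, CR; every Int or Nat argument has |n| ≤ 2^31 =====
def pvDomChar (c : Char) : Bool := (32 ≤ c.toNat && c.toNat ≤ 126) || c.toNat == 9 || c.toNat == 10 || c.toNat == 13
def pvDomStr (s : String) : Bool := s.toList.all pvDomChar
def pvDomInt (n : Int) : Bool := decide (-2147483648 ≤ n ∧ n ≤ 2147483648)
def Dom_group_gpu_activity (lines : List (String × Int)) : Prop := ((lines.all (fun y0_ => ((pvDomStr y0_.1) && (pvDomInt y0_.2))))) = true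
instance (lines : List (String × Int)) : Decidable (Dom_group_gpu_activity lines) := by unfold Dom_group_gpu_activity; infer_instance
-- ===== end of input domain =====

-- B replaces A's list of per-category predicate closures by a plain data table of
-- (name, match-on-lowercase?, needle substrings) with one generic matcher, classifies each
-- kernel once (label pass), then assembles the groups from the labels — an alternative
-- decomposition; equivalence is about the returned grouping.

-- ===== PORT A =====
-- the module-level `activities` table of (category name, predicate)
def activities : List (String × (String → Bool)) := [
  ("nccl", fun x => decide (0 ≤ PySem.Str.find x "nccl")),
  ("gemm", fun x => PySem.Str.isIn "gemm" x),
  ("gemv", fun x => ["cublasGemvTensorStridedBatched"].any (fun s => PySem.Str.isIn s x)),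
  ("memcpy DtoD", fun x => ["memcpy dtod"].any (fun s => PySem.Str.isIn s (PySem.Str.lower x))),
  ("memcpy HtoD", fun x => ["memcpy htod"].any (fun s => PySem.Str.isIn s (PySem.Str.lower x))),
  ("memcpy DtoH", fun x => ["memcpy dtoh"].any (fun s => PySem.Str.isIn s (PySem.Str.lower x))),
  ("memset", fun x => ["memset"].any (fun s => PySem.Str.isIn s x)),
  ("adam", fun x => decide (0 ≤ PySem.Str.find (PySem.Str.lower x) "adam")),
  ("lamb", fun x => decide (0 ≤ PySem.Str.find (PySem.Str.lower x) "lamb")),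
  ("dropout", fun x => decide (0 ≤ PySem.Str.find (PySem.Str.lower x) "dropout")),
  ("gelu", fun x => ["gelu"].any (fun s => PySem.Str.isIn s (PySem.Str.lower x))),
  ("relu", fun x => ["OP_Relu", "threshold_kernel_impl", "clamp_min_scalar_kernel_impl"].any (fun s => PySem.Str.isIn s x)),
  ("sqrt", fun x => PySem.Str.isIn "sqrt" x),
  ("non-zero", fun x => ["NonZero", "write_indices"].any (fun s => PySem.Str.isIn s (PySem.Str.lower x))),
  ("compare", fun x => ["CompareGEFunctor", "CompareNEFunctor", "CompareEqFunctor", "CompareLTFunctor", "CompareGTFunctor", "OP_Greater", "OP_GreaterOrEqual", "OP_Equal", "OP_Less", "OP_LessOrEqual"].any (fun s => PySem.Str.isIn s x)),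
  ("isfinite", fun x => PySem.Str.isIn "foreach_non_finite_check_and_unscale" x),
  ("layernorm", fun x => ["LayerNorm", "layer_norm", "layernorm", "bn_fw_tr_1C11_singleread", "cuCompute"].any (fun s => PySem.Str.isIn s x)),
  ("reduce", fun x => ["reduce", "op_tensor_kernel_alpha2_zero"].any (fun s => PySem.Str.isIn s x)),
  ("cross_entropy", fun x => ["XEntropy", "CrossEntropy", "NLLCriterion"].any (fun s => PySem.Str.isIn s x)),
  ("softmax", fun x => ["softmax"].any (fun s => PySem.Str.isIn s (PySem.Str.lower x))),
  ("embedding", fun x => ["indexSelectLargeIndex", "Embedding", "compute_grad_weight", "krn_partials_per_segment", "krn_partial_segment_offset"].any (fun s => PySem.Str.isIn s x)),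
  ("gather-scatter", fun x => ["gather", "scatter", "index_kernel_impl", "index_put_kernel_impl", "indexing_backward_kernel"].any (fun s => PySem.Str.isIn s (PySem.Str.lower x))),
  ("l2norm", fun x => PySem.Str.isIn "L2Norm" x),
  ("sigmoid", fun x => PySem.Str.isIn "sigmoid" (PySem.Str.lower x)),
  ("add-sub", fun x => ["onnxruntime::cuda::OP_Add", "onnxruntime::cuda::OP_Sub", "at::native::AddFunctor"].any (fun s => PySem.Str.isIn s x)),
  ("mul-div", fun x => ["onnxruntime::cuda::OP_Mul", "onnxruntime::cuda::OP_Div", "at::native::MulFunctor", "at::native::MulScalarFunctor", "ScaleFunctor", "DivFunctor", "onnxruntime::cuda::_Scale", "DivGrad"].any (fun s => PySem.Str.isIn s x)),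
  ("addc-muldiv", fun x => ["addcdiv_cuda_kernel", "addcmul_cuda_kernel"].any (fun s => PySem.Str.isIn s x)),
  ("sort", fun x => ["merge_sort", "RadixSort"].any (fun s => PySem.Str.isIn s x)),
  ("copy", fun x => ["BatchedCopy", "copy_device_to_device"].any (fun s => PySem.Str.isIn s x)),
  ("cast", fun x => PySem.Str.isIn "OP_Cast" x),
  ("transpose", fun x => ["transpose", "copy_kernel_impl"].any (fun s => PySem.Str.isIn s (PySem.Str.lower x))),
  ("slice", fun x => ["Slice"].any (fun s => PySem.Str.isIn s x)),
  ("concat-split", fun x => ["Concat", "Split"].any (fun s => PySem.Str.isIn s x)),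
  ("expand", fun x => ["Expand"].any (fun s => PySem.Str.isIn s x)),
  ("tile", fun x => ["onnxruntime::cuda::_TileMemcpyKernel"].any (fun s => PySem.Str.isIn s x)),
  ("fill_functor", fun x => ["onnxruntime::cuda::_Fill", "at::native::FillFunctor"].any (fun s => PySem.Str.isIn s x)),
  ("where", fun x => ["onnxruntime::cuda::_TenaryElementWise", "kernelPointwiseApply2<TensorMaskedFillOp", "masked_fill_kernel"].any (fun s => PySem.Str.isIn s x)),
  ("element-wise", fun x => ["elementwise", "pointwise"].any (fun s => PySem.Str.isIn s (PySem.Str.lower x))),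
  ("misc", fun _ => true)]

-- inner 'for name, check in activities: if check(kernel_name): groups[name].append(...); break'
def pvClassify1 (k : String) (v : Int) (acts : List (String × (String → Bool)))
    (d : PySem.Dict String (List (List (String × Int)))) : PySem.Dict String (List (List (String × Int))) :=
  match acts with
  | [] => d
  | p :: rest => if p.2 k then d.modify p.1 [] (· ++ [[(k, v)]]) else pvClassify1 k v rest d

def group_gpu_activity (lines : List (String × Int)) : List (String × List (List (String × Int))) :=
  let groups := activities.foldl (fun d p => d.insert p.1 [])
    (PySem.Dict.empty : PySem.Dict String (List (List (String × Int))))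
  (lines.foldl (fun d kv => pvClassify1 kv.1 kv.2 activities d) groups).items

-- ===== PORT B =====
-- the RULES table: (category name, match on lowercase?, needle substrings); "" matches everything
def pvRules : List (String × Bool × List String) := [
  ("nccl", false, ["nccl"]),
  ("gemm", false, ["gemm"]),
  ("gemv", false, ["cublasGemvTensorStridedBatched"]),
  ("memcpy DtoD", true, ["memcpy dtod"]),
  ("memcpy HtoD", true, ["memcpy htod"]),
  ("memcpy DtoH", true, ["memcpy dtoh"]),
  ("memset", false, ["memset"]),
  ("adam", true, ["adam"]),
  ("lamb", true, ["lamb"]),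
  ("dropout", true, ["dropout"]),
  ("gelu", true, ["gelu"]),
  ("relu", false, ["OP_Relu", "threshold_kernel_impl", "clamp_min_scalar_kernel_impl"]),
  ("sqrt", false, ["sqrt"]),
  ("non-zero", true, ["NonZero", "write_indices"]),
  ("compare", false, ["CompareGEFunctor", "CompareNEFunctor", "CompareEqFunctor", "CompareLTFunctor", "CompareGTFunctor", "OP_Greater", "OP_GreaterOrEqual", "OP_Equal", "OP_Less", "OP_LessOrEqual"]),
  ("isfinite", false, ["foreach_non_finite_check_and_unscale"]),
  ("layernorm", false, ["LayerNorm", "layer_norm", "layernorm", "bn_fw_tr_1C11_singleread", "cuCompute"]),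
  ("reduce", false, ["reduce", "op_tensor_kernel_alpha2_zero"]),
  ("cross_entropy", false, ["XEntropy", "CrossEntropy", "NLLCriterion"]),
  ("softmax", true, ["softmax"]),
  ("embedding", false, ["indexSelectLargeIndex", "Embedding", "compute_grad_weight", "krn_partials_per_segment", "krn_partial_segment_offset"]),
  ("gather-scatter", true, ["gather", "scatter", "index_kernel_impl", "index_put_kernel_impl", "indexing_backward_kernel"]),
  ("l2norm", false, ["L2Norm"]),
  ("sigmoid", true, ["sigmoid"]),
  ("add-sub", false, ["onnxruntime::cuda::OP_Add", "onnxruntime::cuda::OP_Sub", "at::native::AddFunctor"]),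
  ("mul-div", false, ["onnxruntime::cuda::OP_Mul", "onnxruntime::cuda::OP_Div", "at::native::MulFunctor", "at::native::MulScalarFunctor", "ScaleFunctor", "DivFunctor", "onnxruntime::cuda::_Scale", "DivGrad"]),
  ("addc-muldiv", false, ["addcdiv_cuda_kernel", "addcmul_cuda_kernel"]),
  ("sort", false, ["merge_sort", "RadixSort"]),
  ("copy", false, ["BatchedCopy", "copy_device_to_device"]),
  ("cast", false, ["OP_Cast"]),
  ("transpose", true, ["transpose", "copy_kernel_impl"]),
  ("slice", false, ["Slice"]),
  ("concat-split", false, ["Concat", "Split"]),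
  ("expand", false, ["Expand"]),
  ("tile", false, ["onnxruntime::cuda::_TileMemcpyKernel"]),
  ("fill_functor", false, ["onnxruntime::cuda::_Fill", "at::native::FillFunctor"]),
  ("where", false, ["onnxruntime::cuda::_TenaryElementWise", "kernelPointwiseApply2<TensorMaskedFillOp", "masked_fill_kernel"]),
  ("element-wise", true, ["elementwise", "pointwise"]),
  ("misc", false, [""])]

-- the 'for name, use_lower, needles in RULES: … return name' loop of _classify
def pvClassifyAux (low k : String) (rs : List (String × Bool × List String)) : String :=
  match rs with
  | [] => "misc"  -- unreachable fallback, as in _classify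
  | r :: rest =>
    if r.2.2.any (fun n => PySem.Str.isIn n (if r.2.1 then low else k)) then r.1
    else pvClassifyAux low k rest

def pvClassify (k : String) : String := pvClassifyAux (PySem.Str.lower k) k pvRules

def group_gpu_activity_alt (lines : List (String × Int)) : List (String × List (List (String × Int))) :=
  let labels := lines.map (fun kv => pvClassify kv.1)
  pvRules.map (fun r =>
    (r.1, ((lines.zip labels).filter (fun p => p.2 == r.1)).map (fun p => [(p.1.1, p.1.2)])))

-- ===== PRECONDITION & SPEC =====
def Spec_group_gpu_activity (lines : List (String × Int)) (out : List (String × List (List (String × Int)))) : Prop := out = group_gpu_activity_alt lines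
instance (lines : List (String × Int)) (out : List (String × List (List (String × Int)))) : Decidable (Spec_group_gpu_activity lines out) := by unfold Spec_group_gpu_activity; infer_instance

-- ===== CLAIM (what is proved, stated in full; the proofs are below) =====
def Claim_equal_group_gpu_activity : Prop := ∀ (lines : List (String × Int)), Dom_group_gpu_activity lines → Spec_group_gpu_activity lines (group_gpu_activity lines)

-- ===== LEMMAS AND PROOFS =====

-- first category of acts matched by k (the name A's break selects)
def pvFirst? (acts : List (String × (String → Bool))) (k : String) : Option String :=
  match acts with
  | [] => none
  | p :: rest => if p.2 k then some p.1 else pvFirst? rest k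

def pvFName (k : String) : String := (pvFirst? activities k).getD ""

lemma pv_names_nodup : (activities.map Prod.fst).Nodup := by decide

lemma pv_any_true (k : String) : activities.any (fun p => p.2 k) = true := by
  simp [activities]

lemma pvFirst?_mem {acts : List (String × (String → Bool))} {k n : String}
    (h : pvFirst? acts k = some n) : n ∈ acts.map Prod.fst := by
  induction acts with
  | nil => simp [pvFirst?] at h
  | cons p rest ih =>
    simp only [pvFirst?] at h
    split at h
    · simp only [Option.some.injEq] at h; simp [h]
    · simpa using Or.inr (ih h)

lemma pvFirst?_isSome {acts : List (String × (String → Bool))} {k : String}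
    (h : acts.any (fun p => p.2 k) = true) : (pvFirst? acts k).isSome := by
  induction acts with
  | nil => simp at h
  | cons p rest ih =>
    simp only [pvFirst?]
    split
    · rfl
    · next hp => exact ih (by simpa [hp] using h)

lemma pvFirst_activities (k : String) : pvFirst? activities k = some (pvFName k) := by
  have h := pvFirst?_isSome (pv_any_true k)
  unfold pvFName
  cases hh : pvFirst? activities k with
  | none => rw [hh] at h; simp at h
  | some n => rfl

lemma pv_classify_eq (k : String) (v : Int) (acts : List (String × (String → Bool)))
    (d : PySem.Dict String (List (List (String × Int)))) :
    pvClassify1 k v acts d =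
      match pvFirst? acts k with
      | some n => d.modify n [] (· ++ [[(k, v)]])
      | none => d := by
  induction acts with
  | nil => rfl
  | cons p rest ih =>
    simp only [pvClassify1, pvFirst?]
    split
    · rfl
    · exact ih

-- ----- A-side characterization -----

lemma pv_getD_fold (acts : List (String × (String → Bool)))
    (d : PySem.Dict String (List (List (String × Int))))
    (hd : ∀ n, d.getD n [] = []) (n : String) :
    (acts.foldl (fun d p => d.insert p.1 []) d).getD n [] = [] := by
  induction acts generalizing d with
  | nil => exact hd n
  | cons p rest ih =>
    simp only [List.foldl_cons]
    refine ih _ (fun m => ?_)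
    rw [PySem.Dict.getD_insert]
    split <;> [rfl; exact hd m]

lemma pvA_char (lines : List (String × Int)) :
    group_gpu_activity lines = (activities.map Prod.fst).map
      (fun n => (n, (lines.filter (fun kv => pvFName kv.1 == n)).map (fun kv => [(kv.1, kv.2)]))) := by
  have hGA : group_gpu_activity lines = (lines.foldl
      (fun d kv => pvClassify1 kv.1 kv.2 activities d)
      (activities.foldl (fun d p => d.insert p.1 [])
        (PySem.Dict.empty : PySem.Dict String (List (List (String × Int)))))).items := rfl
  rw [hGA]
  set d0 := activities.foldl (fun d p => d.insert p.1 [])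
    (PySem.Dict.empty : PySem.Dict String (List (List (String × Int)))) with hd0
  have hd0keys : d0.keys = activities.map Prod.fst := by
    rw [hd0, PySem.Dict.keys_foldl_insert_key]
    rw [PySem.Dict.keys_empty, PySem.Set.update_nil_left]
    exact PySem.Set.ofList_eq_self_of_nodup _ pv_names_nodup
  have hd0getD : ∀ n, d0.getD n [] = [] := by
    intro n
    exact pv_getD_fold activities _ (fun m => PySem.Dict.getD_empty m []) n
  have hfold : lines.foldl (fun d kv => pvClassify1 kv.1 kv.2 activities d) d0
      = lines.foldl (fun d kv => d.modify (pvFName kv.1) [] (· ++ [[(kv.1, kv.2)]])) d0 := by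
    apply PySem.List.foldl_congr_mem
    intro d kv _
    rw [pv_classify_eq, pvFirst_activities]
  rw [hfold]
  have hkeys : (lines.foldl (fun d kv => d.modify (pvFName kv.1) [] (· ++ [[(kv.1, kv.2)]])) d0).keys
      = activities.map Prod.fst := by
    rw [PySem.Dict.keys_foldl_modify_key lines (fun kv => pvFName kv.1) []
      (fun _ kv => (· ++ [[(kv.1, kv.2)]])) d0, hd0keys, PySem.Set.update_eq_append_filter]
    have hnil : ((PySem.Set.ofList (lines.map (fun kv => pvFName kv.1))).filter
        (fun y => !(PySem.Set.contains (activities.map Prod.fst) y))) = [] := by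
      rw [List.filter_eq_nil_iff]
      intro y hy
      have hy' : y ∈ lines.map (fun kv => pvFName kv.1) := (PySem.Set.mem_ofList _ _).1 hy
      obtain ⟨kv, _, hkv⟩ := List.mem_map.1 hy'
      have hmem : y ∈ activities.map Prod.fst := hkv ▸ pvFirst?_mem (pvFirst_activities kv.1)
      obtain ⟨⟨n1, f1⟩, ha, he⟩ := List.mem_map.1 hmem
      simp only [Bool.not_eq_true, Bool.not_eq_false', PySem.Set.contains_eq_listContains,
        List.contains_eq_mem, decide_eq_true_eq, List.mem_map]
      exact ⟨(n1, f1), ha, he⟩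
    rw [hnil, List.append_nil]
  have hnd : (lines.foldl (fun d kv => d.modify (pvFName kv.1) [] (· ++ [[(kv.1, kv.2)]])) d0).keys.Nodup := by
    rw [hkeys]; exact pv_names_nodup
  rw [PySem.Dict.items_eq_map_keys _ hnd [], hkeys]
  refine List.map_congr_left (fun n _ => ?_)
  have hmap : lines.foldl (fun d kv => d.modify (pvFName kv.1) [] (· ++ [[(kv.1, kv.2)]])) d0
      = (lines.map (fun kv => (pvFName kv.1, [(kv.1, kv.2)]))).foldl
          (fun d p => d.modify p.1 [] (· ++ [p.2])) d0 := by
    simp only [List.foldl_map]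
  rw [hmap, PySem.Dict.getD_foldl_modify_append, hd0getD, List.nil_append,
    List.filter_map, List.map_map]
  rfl

-- ----- B-side: the table classifier computes A's first matching category -----

lemma pv_isIn_find (n s : List Char) : PySem.Chars.isIn n s = decide (0 ≤ PySem.Chars.find s n) := by
  rw [Bool.eq_iff_iff]
  simp [PySem.Chars.isIn_iff_infix, PySem.Chars.find_nonneg_iff]

-- the rules table and the activities table are aligned: same names, same predicate values
lemma pv_aligned (k : String) :
    List.Forall₂ (fun (r : String × Bool × List String) (a : String × (String → Bool)) =>
      r.1 = a.1 ∧ (r.2.2.any (fun n => PySem.Str.isIn n (if r.2.1 then PySem.Str.lower k else k)) = a.2 k))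
      pvRules activities := by
  simp [pvRules, activities, List.forall₂_cons, pv_isIn_find]

lemma pv_first_eq (k low : String) (rs : List (String × Bool × List String))
    (acts : List (String × (String → Bool)))
    (hal : List.Forall₂ (fun (r : String × Bool × List String) (a : String × (String → Bool)) =>
      r.1 = a.1 ∧ (r.2.2.any (fun n => PySem.Str.isIn n (if r.2.1 then low else k)) = a.2 k)) rs acts)
    (hany : acts.any (fun a => a.2 k) = true) :
    pvFirst? acts k = some (pvClassifyAux low k rs) := by
  induction hal with
  | nil => simp at hany
  | cons hra htl ih =>
    rename_i r a rs' acts'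
    simp only [pvFirst?, pvClassifyAux]
    rw [← hra.2, ← hra.1]
    by_cases hc : (r.2.2.any fun n => PySem.Str.isIn n (if r.2.1 then low else k)) = true
    · rw [if_pos hc, if_pos hc]
    · rw [if_neg hc, if_neg hc]
      refine ih ?_
      rw [List.any_cons, ← hra.2] at hany
      rcases Bool.or_eq_true_iff.mp hany with h1 | h1
      · exact absurd h1 hc
      · exact h1

lemma pv_classify_fname (k : String) : pvClassify k = pvFName k := by
  have h := pv_first_eq k (PySem.Str.lower k) pvRules activities (pv_aligned k) (pv_any_true k)
  rw [pvFirst_activities k] at h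
  exact (Option.some.injEq _ _ ▸ h).symm

lemma pv_zip_self_map {α β : Type} (l : List α) (f : α → β) :
    l.zip (l.map f) = l.map (fun a => (a, f a)) := by
  induction l with
  | nil => rfl
  | cons x xs ih => simp [ih]

lemma pvB_char (lines : List (String × Int)) :
    group_gpu_activity_alt lines = (activities.map Prod.fst).map
      (fun n => (n, (lines.filter (fun kv => pvFName kv.1 == n)).map (fun kv => [(kv.1, kv.2)]))) := by
  have hnames : pvRules.map Prod.fst = activities.map Prod.fst := by decide
  have halt : group_gpu_activity_alt lines = pvRules.map (fun r =>
      (r.1, ((lines.zip (lines.map (fun kv => pvClassify kv.1))).filter (fun p => p.2 == r.1)).map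
        (fun p => [(p.1.1, p.1.2)]))) := rfl
  rw [halt, pv_zip_self_map lines (fun kv => pvClassify kv.1)]
  have : pvRules.map (fun r =>
      (r.1, (((lines.map (fun kv => (kv, pvClassify kv.1))).filter
        (fun p => p.2 == r.1)).map (fun p => [(p.1.1, p.1.2)]))))
      = (pvRules.map Prod.fst).map (fun n =>
      (n, (lines.filter (fun kv => pvFName kv.1 == n)).map (fun kv => [(kv.1, kv.2)]))) := by
    rw [List.map_map]
    refine List.map_congr_left (fun r _ => ?_)
    have hf : List.filter ((fun (p : (String × Int) × String) => p.2 == r.1) ∘ fun kv => (kv, pvClassify kv.1)) lines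
        = List.filter (fun kv => pvFName kv.1 == r.1) lines := by
      refine List.filter_congr (fun kv _ => ?_)
      simp [Function.comp, pv_classify_fname]
    simp only [List.filter_map, List.map_map, hf]
    rfl
  rw [this, hnames]

-- ===== VERDICT (by name: the statement is the Claim_ definition above) =====
theorem group_gpu_activity_spec : Claim_equal_group_gpu_activity := by
  intro lines _
  unfold Spec_group_gpu_activity
  rw [pvA_char, pvB_char]
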